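-- pv_equiv track=rewrite | github.com/zxvozayy/ai_tutor | app/ui/listening_widget.py | normalize_level
-- ===== SOURCE A (Python) =====
-- LEVELS = ["A1", "A2", "B1", "B2", "C1", "C2"]
--
-- def normalize_level(raw: str, default="B1") -> str:
--     if not raw:
--         return default
--     s = raw.upper().strip()
--     for lvl in LEVELS:
--         if s.startswith(lvl):
--             return lvl
--     return default
-- ===== SOURCE B (Python) =====
-- LEVELS = {"A1", "A2", "B1", "B2", "C1", "C2"}
--
-- def normalize_level(raw: str, default="B1") -> str:
--     if not raw:
--         return default
--     k = raw.upper().strip()[:2]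
--     return k if k in LEVELS else default
-- ===== Notes on version B (the rewrite author's own statement) =====
-- stated objective: idiomatic
-- what changed: Replaces the linear scan over the level list with startswith tests by a single two-character slice and one set-membership lookup (valid because every level code is exactly two characters and none is a prefix of another).
import Mathlib
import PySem

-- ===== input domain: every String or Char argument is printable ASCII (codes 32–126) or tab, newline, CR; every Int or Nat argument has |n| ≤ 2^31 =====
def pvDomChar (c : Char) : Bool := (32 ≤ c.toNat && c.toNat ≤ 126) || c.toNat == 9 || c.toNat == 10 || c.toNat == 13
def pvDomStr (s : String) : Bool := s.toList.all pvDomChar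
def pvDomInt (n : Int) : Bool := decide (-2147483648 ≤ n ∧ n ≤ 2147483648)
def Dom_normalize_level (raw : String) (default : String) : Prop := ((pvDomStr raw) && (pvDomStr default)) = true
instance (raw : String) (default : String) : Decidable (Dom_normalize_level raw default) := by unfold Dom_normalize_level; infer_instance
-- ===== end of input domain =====

-- B replaces A's linear startswith-scan over the level list by one two-character
-- slice plus a set-membership lookup (every level code is exactly two characters).

-- ===== PORT A =====
def LEVELS : List String := ["A1", "A2", "B1", "B2", "C1", "C2"]

-- 'for lvl in LEVELS: if s.startswith(lvl): return lvl' / fall through to default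
def findLevel : List String → String → String → String
  | [], _, default => default
  | lvl :: rest, s, default =>
      if PySem.Str.startswith s lvl then lvl else findLevel rest s default

def normalize_level (raw : String) (default : String) : String :=
  if raw = "" then default
  else
    let s := PySem.Str.strip (PySem.Str.upper raw)
    findLevel LEVELS s default

-- ===== PORT B =====
def LEVEL_SET : PySem.Set String := PySem.Set.ofList ["A1", "A2", "B1", "B2", "C1", "C2"]

def normalize_level_alt (raw : String) (default : String) : String :=
  if raw = "" then default
  else
    let k := PySem.Str.slice (PySem.Str.strip (PySem.Str.upper raw)) none (some 2)
    if k ∈ LEVEL_SET then k else default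

-- ===== PRECONDITION & SPEC =====
def Spec_normalize_level (raw : String) (default : String) (out : String) : Prop := out = normalize_level_alt raw default
instance (raw : String) (default : String) (out : String) : Decidable (Spec_normalize_level raw default out) := by unfold Spec_normalize_level; infer_instance

-- ===== CLAIM (what is proved, stated in full; the proofs are below) =====
def Claim_equal_normalize_level : Prop := ∀ (raw : String) (default : String), Dom_normalize_level raw default → Spec_normalize_level raw default (normalize_level raw default)

-- ===== LEMMAS AND PROOFS =====

lemma sw_iff (s p : String) (a b : Char) (hp : p.toList = [a, b]) :
    PySem.Str.startswith s p = true ↔ s.toList.take 2 = [a, b] := by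
  rw [PySem.Str.startswith_eq, PySem.Chars.startswith_iff, hp, List.prefix_iff_eq_take]
  simp [eq_comm]

-- the two-character slice, on the list side
lemma slice2_toList (s : String) :
    (PySem.Str.slice s none (some 2)).toList = s.toList.take 2 := by
  rw [PySem.Str.toList_slice, PySem.Chars.slice_eq_listSlice]
  have : ((2 : Nat) : Int) = (2 : Int) := by norm_num
  rw [← this, PySem.List.slice_to_natCast]

-- slice-equals-level, on the list side
lemma keq (s p : String) (a b : Char) (hp : p.toList = [a, b]) :
    PySem.Str.slice s none (some 2) = p ↔ s.toList.take 2 = [a, b] := by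
  constructor
  · intro h; rw [← slice2_toList, h, hp]
  · intro h
    apply String.toList_injective
    rw [slice2_toList, h, hp]

-- the core: A's scan over LEVELS equals B's slice-and-member test
lemma findLevel_eq (s d : String) :
    findLevel LEVELS s d =
      (if PySem.Str.slice s none (some 2) ∈ LEVEL_SET
       then PySem.Str.slice s none (some 2) else d) := by
  have hset : LEVEL_SET = ["A1", "A2", "B1", "B2", "C1", "C2"] := by decide
  simp only [LEVELS, findLevel, hset, List.mem_cons, List.not_mem_nil, or_false,
    sw_iff s "A1" 'A' '1' (by decide), sw_iff s "A2" 'A' '2' (by decide),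
    sw_iff s "B1" 'B' '1' (by decide), sw_iff s "B2" 'B' '2' (by decide),
    sw_iff s "C1" 'C' '1' (by decide), sw_iff s "C2" 'C' '2' (by decide),
    keq s "A1" 'A' '1' (by decide), keq s "A2" 'A' '2' (by decide),
    keq s "B1" 'B' '1' (by decide), keq s "B2" 'B' '2' (by decide),
    keq s "C1" 'C' '1' (by decide), keq s "C2" 'C' '2' (by decide)]
  by_cases h1 : s.toList.take 2 = ['A', '1']
  · simp [h1, (keq s "A1" 'A' '1' (by decide)).mpr h1]
  by_cases h2 : s.toList.take 2 = ['A', '2']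
  · simp [h2, (keq s "A2" 'A' '2' (by decide)).mpr h2]
  by_cases h3 : s.toList.take 2 = ['B', '1']
  · simp [h3, (keq s "B1" 'B' '1' (by decide)).mpr h3]
  by_cases h4 : s.toList.take 2 = ['B', '2']
  · simp [h4, (keq s "B2" 'B' '2' (by decide)).mpr h4]
  by_cases h5 : s.toList.take 2 = ['C', '1']
  · simp [h5, (keq s "C1" 'C' '1' (by decide)).mpr h5]
  by_cases h6 : s.toList.take 2 = ['C', '2']
  · simp [h6, (keq s "C2" 'C' '2' (by decide)).mpr h6]
  · simp [h1, h2, h3, h4, h5, h6]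

-- ===== VERDICT (by name: the statement is the Claim_ definition above) =====
theorem normalize_level_spec : Claim_equal_normalize_level := by
  intro raw default _
  unfold Spec_normalize_level normalize_level normalize_level_alt
  by_cases h : raw = ""
  · simp [h]
  · simp only [h, if_false]
    exact findLevel_eq _ _
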